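-- pv_equiv track=rewrite | github.com/Guiyom974/Autoresearch-BatchMode | experiments/breakthrough/Analytic Number Theory - Primorial Distribution Asymmetries - 20260326_080610/run_003/05_experiment_code.py | get_leading_digit_baseline
-- ===== SOURCE A (Python) =====
-- def number_to_base_convert(num, base):
--     """Convert number to given base representation."""
--     if num == 0:
--         return [0]
--     digits = []
--     while num > 0:
--         digits.append(num % base)
--         num //= base
--     return digits[::-1]
--
-- def get_leading_digit_baseline(numbers, base):
--     """Baseline: Get leading digit of numbers in given base (unoptimized)."""
--     leading_digits = []
--     for num in numbers:
--         if num <= 0: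
--             continue
--         digits = number_to_base_convert(num, base)
--         for d in digits:
--             if d != 0:
--                 leading_digits.append(d)
--                 break
--     return leading_digits
-- ===== SOURCE B (Python) =====
-- def get_leading_digit_baseline(numbers, base):
--     """Leading digit in given base: divide each positive number down below base."""
--     leading_digits = []
--     for num in numbers:
--         if num <= 0:
--             continue
--         while num >= base:
--             num //= base
--         leading_digits.append(num)
--     return leading_digits
-- ===== Notes on version B (the rewrite author's own statement) =====
-- stated objective: simpler
-- what changed: B drops the full base-conversion (digit list, reversal, scan for first nonzero) and keeps only a running quotient: divide num by base until it is below base; what remains is the leading digit.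
-- outside the precondition, e.g. on get_leading_digit_baseline([5], -2): A returns [-1], B returns [-3]; on get_leading_digit_baseline([5], -1): A returns [], B returns [-5]
import Mathlib
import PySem

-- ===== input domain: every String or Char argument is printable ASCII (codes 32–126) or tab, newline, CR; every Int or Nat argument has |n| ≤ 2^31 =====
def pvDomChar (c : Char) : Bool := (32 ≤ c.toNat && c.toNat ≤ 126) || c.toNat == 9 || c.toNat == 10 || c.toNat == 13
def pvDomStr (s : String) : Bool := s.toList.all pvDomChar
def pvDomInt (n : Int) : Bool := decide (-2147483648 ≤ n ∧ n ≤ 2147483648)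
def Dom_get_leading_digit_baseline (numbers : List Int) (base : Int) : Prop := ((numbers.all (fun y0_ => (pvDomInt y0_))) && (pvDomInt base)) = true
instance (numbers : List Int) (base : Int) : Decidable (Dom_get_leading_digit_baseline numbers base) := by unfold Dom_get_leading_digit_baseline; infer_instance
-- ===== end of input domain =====

-- B replaces A's convert-to-digit-list / reverse / scan-for-first-nonzero by a single running
-- quotient per number (simpler); equivalence is claimed for base ≥ 2 (or no positive number).

-- ===== PORT A =====
-- the `while num > 0` loop of number_to_base_convert; fuel num.toNat+1 suffices on every input
-- on which the Python loop terminates (under Pre_ : base ≥ 2, num shrinks strictly each step)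
def ntbLoop : Nat → Int → Int → List Int → List Int
  | 0, _, _, digits => digits
  | f + 1, num, base, digits =>
    if 0 < num then
      ntbLoop f (PySem.Int.floordiv num base) base (digits ++ [PySem.Int.mod num base])
    else digits

def number_to_base_convert (num base : Int) : List Int :=
  if num = 0 then [0]
  else (ntbLoop (num.toNat + 1) num base []).reverse  -- digits[::-1] on a list is exactly List.reverse

-- `for d in digits: if d != 0: leading_digits.append(d); break`
def firstNonZeroAppend (acc : List Int) : List Int → List Int
  | [] => acc
  | d :: ds => if d ≠ 0 then acc ++ [d] else firstNonZeroAppend acc ds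

def get_leading_digit_baseline (numbers : List Int) (base : Int) : List Int :=
  numbers.foldl
    (fun acc num =>
      if num ≤ 0 then acc
      else firstNonZeroAppend acc (number_to_base_convert num base)) []

-- ===== PORT B =====
-- `while num >= base: num //= base`; same fuel argument as above
def leadLoop : Nat → Int → Int → Int
  | 0, num, _ => num
  | f + 1, num, base => if base ≤ num then leadLoop f (PySem.Int.floordiv num base) base else num

def get_leading_digit_baseline_alt (numbers : List Int) (base : Int) : List Int :=
  numbers.foldl
    (fun acc num =>
      if num ≤ 0 then acc
      else acc ++ [leadLoop (num.toNat + 1) num base]) []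

-- ===== PRECONDITION & SPEC =====
-- Pre_ requires base ≥ 2 whenever a positive number is present: for base 0 both programs raise
-- ZeroDivisionError, for base 1 both loop forever, and for a negative base there is no positional
-- representation, so A's and B's returned values there are both accidental and defensible.
def Pre_get_leading_digit_baseline (numbers : List Int) (base : Int) : Prop :=
  2 ≤ base ∨ ∀ n ∈ numbers, n ≤ 0
instance (numbers : List Int) (base : Int) : Decidable (Pre_get_leading_digit_baseline numbers base) := by unfold Pre_get_leading_digit_baseline; infer_instance

def pvWitness_get_leading_digit_baseline : List Int × Int := ([5, 7, 100, -3, 0], 10)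

def Spec_get_leading_digit_baseline (numbers : List Int) (base : Int) (out : List Int) : Prop := out = get_leading_digit_baseline_alt numbers base
instance (numbers : List Int) (base : Int) (out : List Int) : Decidable (Spec_get_leading_digit_baseline numbers base out) := by unfold Spec_get_leading_digit_baseline; infer_instance

-- ===== CLAIM (what is proved, stated in full; the proofs are below) =====
def Claim_equal_get_leading_digit_baseline : Prop := ∀ (numbers : List Int) (base : Int), Dom_get_leading_digit_baseline numbers base → Pre_get_leading_digit_baseline numbers base → Spec_get_leading_digit_baseline numbers base (get_leading_digit_baseline numbers base)

-- ===== LEMMAS AND PROOFS =====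

theorem ntbLoop_append (f : Nat) : ∀ (num base : Int) (digits : List Int),
    ntbLoop f num base digits = digits ++ ntbLoop f num base [] := by
  induction f with
  | zero => intro num base digits; simp [ntbLoop]
  | succ f ih =>
    intro num base digits
    by_cases h : 0 < num
    · simp only [ntbLoop, if_pos h]
      rw [ih _ _ (digits ++ _), ih _ _ ([] ++ _)]
      simp
    · simp [ntbLoop, h]

-- The digit list A builds ends with exactly the quotient B keeps, and that quotient is positive.
theorem ntbLoop_last (f : Nat) : ∀ (num base : Int), 2 ≤ base → 0 < num → num.toNat < f →
    ∃ pre, ntbLoop f num base [] = pre ++ [leadLoop f num base] ∧ 0 < leadLoop f num base := by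
  induction f with
  | zero => intro num base _ _ hf; omega
  | succ f ih =>
    intro num base hb hpos hf
    have hb0 : (0 : Int) < base := by omega
    simp only [ntbLoop, if_pos hpos, List.nil_append]
    rw [ntbLoop_append]
    by_cases hge : base ≤ num
    · have hq1 : 1 ≤ PySem.Int.floordiv num base := by
        rw [PySem.Int.le_floordiv_iff_mul_le hb0]; omega
      have hqlt : PySem.Int.floordiv num base < num := by
        rw [PySem.Int.floordiv_lt_iff_lt_mul hb0]; nlinarith
      obtain ⟨pre, hpre, hlpos⟩ := ih (PySem.Int.floordiv num base) base hb (by omega) (by omega)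
      refine ⟨PySem.Int.mod num base :: pre, ?_, ?_⟩
      · simp [leadLoop, if_pos hge, hpre]
      · simpa [leadLoop, if_pos hge] using hlpos
    · have hlt : num < base := by omega
      have hq0 : PySem.Int.floordiv num base = 0 := by
        rw [PySem.Int.floordiv_eq_iff_of_pos hb0]; omega
      have hm : PySem.Int.mod num base = num := by
        rw [PySem.Int.mod_eq_emod_of_pos hb0, Int.emod_eq_of_lt (by omega) hlt]
      have hnil : ntbLoop f 0 base [] = [] := by cases f <;> simp [ntbLoop]
      refine ⟨[], ?_, ?_⟩
      · simp [hq0, hnil, hm, leadLoop, hge]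
      · simpa [leadLoop, if_neg hge] using hpos

theorem step_eq (num base : Int) (acc : List Int) (hb : 2 ≤ base) (hpos : 0 < num) :
    firstNonZeroAppend acc (number_to_base_convert num base)
      = acc ++ [leadLoop (num.toNat + 1) num base] := by
  obtain ⟨pre, hpre, hlpos⟩ := ntbLoop_last (num.toNat + 1) num base hb hpos (by omega)
  have hne : num ≠ 0 := by omega
  have hlne : leadLoop (num.toNat + 1) num base ≠ 0 := by omega
  simp [number_to_base_convert, hne, hpre, firstNonZeroAppend, hlne]

theorem fold_eq (base : Int) : ∀ (l : List Int) (acc : List Int),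
    (2 ≤ base ∨ ∀ n ∈ l, n ≤ 0) →
    l.foldl (fun acc num => if num ≤ 0 then acc
        else firstNonZeroAppend acc (number_to_base_convert num base)) acc
      = l.foldl (fun acc num => if num ≤ 0 then acc
        else acc ++ [leadLoop (num.toNat + 1) num base]) acc := by
  intro l
  induction l with
  | nil => intro acc _; rfl
  | cons n l ih =>
    intro acc h
    simp only [List.foldl_cons]
    by_cases hn : n ≤ 0
    · simp only [if_pos hn]
      exact ih acc (h.imp id fun hall m hm => hall m (List.mem_cons_of_mem _ hm))
    · have hb : 2 ≤ base := by
        rcases h with hb | hall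
        · exact hb
        · exact absurd (hall n (List.mem_cons_self ..)) hn
      simp only [if_neg hn]
      rw [step_eq n base acc hb (by omega)]
      exact ih _ (Or.inl hb)

-- ===== VERDICT (by name: the statement is the Claim_ definition above) =====
theorem get_leading_digit_baseline_spec : Claim_equal_get_leading_digit_baseline := by
  intro numbers base _hdom hpre
  unfold Spec_get_leading_digit_baseline get_leading_digit_baseline get_leading_digit_baseline_alt
  exact fold_eq base numbers [] hpre
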